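-- pv_equiv track=rewrite | github.com/ryan-sanjaya1/cats | typing.py | swap_diff
-- ===== SOURCE A (Python) =====
-- def swap_diff(start, goal, limit):
--     """A diff function for autocorrect that determines how many letters
--     in START need to be substituted to create GOAL, then adds the difference in
--     their lengths.
--     """
--     # BEGIN PROBLEM 6
--     if limit < 0:
--         return 0
--     if len(start) == 1 and len(goal) == 1:
--         if start != goal:
--             return 1
--         else:
--             return 0
--     elif len(start) == 1 or len(goal) == 1:
--         if start[0] != goal[0]:
--             return 1 + abs(len(start)-len(goal))
--         else:
--             return 0 + abs(len(start)-len(goal))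
--     else:
--         if start[0] != goal[0]:
--             return 1 + swap_diff(start[1:],goal[1:],limit-1)
--         else:
--             return 0 + swap_diff(start[1:],goal[1:],limit)
-- ===== SOURCE B (Python) =====
-- def swap_diff(start, goal, limit):
--     """A diff function for autocorrect that determines how many letters
--     in START need to be substituted to create GOAL, then adds the difference in
--     their lengths.
--     """
--     c = 0
--     for a, b in zip(start, goal):
--         if c > limit:
--             return c
--         if a != b:
--             c += 1
--     return c + abs(len(start) - len(goal))
-- ===== Notes on version B (the rewrite author's own statement) =====
-- stated objective: faster
-- what changed: Replaced A's recursive per-character string slicing (start[1:], goal[1:]) with a single index-free loop over zip(start, goal) carrying a mismatch accumulator, checking the budget at the top of each iteration; Pre_ excludes empty start/goal, where A raises IndexError for limit >= 0 and, for limit < 0, A's immediate 0 and B's length delta are both defensible 'exceeds limit' answers.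
-- outside the precondition, e.g. on swap_diff('', 'ab', -1): A returns 0, B returns 2
import Mathlib
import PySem

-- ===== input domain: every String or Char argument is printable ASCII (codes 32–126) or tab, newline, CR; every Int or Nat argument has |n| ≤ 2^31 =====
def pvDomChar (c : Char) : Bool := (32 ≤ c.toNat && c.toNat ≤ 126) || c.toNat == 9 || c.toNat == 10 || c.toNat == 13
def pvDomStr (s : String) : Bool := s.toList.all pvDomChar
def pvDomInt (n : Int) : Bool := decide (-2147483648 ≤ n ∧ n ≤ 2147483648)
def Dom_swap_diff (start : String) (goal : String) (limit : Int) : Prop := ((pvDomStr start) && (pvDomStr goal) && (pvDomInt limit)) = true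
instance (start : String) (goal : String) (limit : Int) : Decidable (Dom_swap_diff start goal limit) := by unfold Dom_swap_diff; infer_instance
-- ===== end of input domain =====

-- B replaces A's recursive suffix-slicing with one iterative pass over the zipped
-- character pairs, checking the budget at the top of each iteration (objective: faster).

-- ===== PORT A =====
-- Literal port of A's recursion on List Char (start[1:] = tail, start[0] = head).
-- `headD` / the final `_, _` case are only reached where Python raises IndexError
-- (an empty string with limit ≥ 0), which Pre_ excludes.
def swapA : List Char → List Char → Int → Int
  | s, g, limit =>
    if limit < 0 then 0
    else if s.length = 1 ∧ g.length = 1 then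
      if s ≠ g then 1 else 0
    else if s.length = 1 ∨ g.length = 1 then
      if s.headD ' ' ≠ g.headD ' ' then 1 + |(s.length : Int) - (g.length : Int)|
      else 0 + |(s.length : Int) - (g.length : Int)|
    else
      match s, g with
      | a :: s', b :: g' =>
        if a ≠ b then 1 + swapA s' g' (limit - 1)
        else 0 + swapA s' g' limit
      | _, _ => 0   -- Python raises IndexError here (outside Pre_)

def swap_diff (start : String) (goal : String) (limit : Int) : Int :=
  swapA start.toList goal.toList limit

-- ===== PORT B =====
-- B's for-loop over zip(start, goal): budget check first, then the comparison;
-- after the loop, add the length delta.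
def loopB (ps : List (Char × Char)) (limit : Int) (c : Int) (delta : Int) : Int :=
  match ps with
  | [] => c + delta
  | (a, b) :: rest =>
    if c > limit then c
    else loopB rest limit (if a ≠ b then c + 1 else c) delta

def swap_diff_alt (start : String) (goal : String) (limit : Int) : Int :=
  loopB (start.toList.zip goal.toList) limit 0
    |(start.toList.length : Int) - (goal.toList.length : Int)|

-- ===== PRECONDITION & SPEC =====
-- Pre_ excludes empty start/goal: there A raises IndexError when limit ≥ 0, and when
-- limit < 0 A's immediate 0 and B's length delta are both defensible 'exceeds limit' answers.
def Pre_swap_diff (start : String) (goal : String) (limit : Int) : Prop :=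
  start.toList ≠ [] ∧ goal.toList ≠ []
instance (start : String) (goal : String) (limit : Int) : Decidable (Pre_swap_diff start goal limit) := by unfold Pre_swap_diff; infer_instance

def pvWitness_swap_diff : String × String × Int := ("cat", "cot", 2)

def Spec_swap_diff (start : String) (goal : String) (limit : Int) (out : Int) : Prop := out = swap_diff_alt start goal limit
instance (start : String) (goal : String) (limit : Int) (out : Int) : Decidable (Spec_swap_diff start goal limit out) := by unfold Spec_swap_diff; infer_instance

-- ===== CLAIM (what is proved, stated in full; the proofs are below) =====
def Claim_equal_swap_diff : Prop := ∀ (start : String) (goal : String) (limit : Int), Dom_swap_diff start goal limit → Pre_swap_diff start goal limit → Spec_swap_diff start goal limit (swap_diff start goal limit)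


-- ===== LEMMAS AND PROOFS =====

-- A returns 0 immediately once the limit is negative.
theorem swapA_limit_neg (s g : List Char) (limit : Int) (h : limit < 0) :
    swapA s g limit = 0 := by
  cases s <;> cases g <;> simp [swapA, h]

-- Shifting the accumulator out of loopB.
theorem loopB_shift (ps : List (Char × Char)) (limit c delta : Int) :
    loopB ps limit c delta = c + loopB ps (limit - c) 0 delta := by
  induction ps generalizing limit c with
  | nil => simp [loopB]
  | cons p rest ih =>
    obtain ⟨a, b⟩ := p
    simp only [loopB]
    by_cases hc : c > limit
    · rw [if_pos hc, if_pos (show (0:Int) > limit - c by omega)]; ring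
    · rw [if_neg hc, if_neg (show ¬ ((0:Int) > limit - c) by omega)]
      by_cases hab : a ≠ b
      · rw [if_pos hab, if_pos hab, ih limit (c + 1), ih (limit - c) (0 + 1)]
        have h : limit - (c + 1) = limit - c - (0 + 1) := by ring
        rw [h]; ring
      · rw [if_neg hab, if_neg hab, ih limit c, ih (limit - c) 0]

-- One unfolding step of loopB.
theorem loopB_cons (a b : Char) (rest : List (Char × Char)) (limit c delta : Int) :
    loopB ((a, b) :: rest) limit c delta =
      if c > limit then c else loopB rest limit (if a ≠ b then c + 1 else c) delta := rfl

-- Main lemma: on nonempty inputs with limit ≥ 0, A's recursion equals B's single pass.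
theorem swapA_eq_loopB (s : List Char) : ∀ (g : List Char) (a b : Char) (limit : Int),
    0 ≤ limit →
    swapA (a :: s) (b :: g) limit =
      loopB ((a, b) :: s.zip g) limit 0 |(s.length : Int) - (g.length : Int)| := by
  induction s with
  | nil =>
    intro g a b limit hlim
    cases g with
    | nil =>
      simp only [swapA, loopB]
      rw [if_neg (show ¬ limit < 0 by omega), if_pos (by simp),
        if_neg (show ¬ ((0:Int) > limit) by omega)]
      by_cases hab : a = b <;> simp [hab, loopB]
    | cons b2 g' =>
      rw [swapA, if_neg (show ¬ limit < 0 by omega), if_neg (by simp), if_pos (by simp)]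
      simp only [List.zip_nil_left, loopB, List.headD,
        if_neg (show ¬ ((0:Int) > limit) by omega)]
      by_cases hab : a = b <;> simp [hab]
  | cons a2 s' ih =>
    intro g a b limit hlim
    cases g with
    | nil =>
      rw [swapA, if_neg (show ¬ limit < 0 by omega), if_neg (by simp), if_pos (by simp)]
      simp only [List.zip_nil_right, loopB, List.headD,
        if_neg (show ¬ ((0:Int) > limit) by omega)]
      by_cases hab : a = b <;> simp [hab]
    | cons b2 g' =>
      rw [swapA, if_neg (show ¬ limit < 0 by omega), if_neg (by simp), if_neg (by simp)]
      have hΔ : |(((a2 :: s').length : Int)) - (((b2 :: g').length : Int))|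
          = |((s'.length : Int)) - ((g'.length : Int))| := by
        congr 1; simp only [List.length_cons]; push_cast; ring
      simp only [List.zip_cons_cons]
      rw [hΔ, loopB_cons, if_neg (show ¬ ((0:Int) > limit) by omega)]
      by_cases hab : a = b
      · rw [if_neg (by simp [hab])]
        have hacc : (if a ≠ b then (0:Int) + 1 else 0) = 0 := by simp [hab]
        rw [hacc, ih g' a2 b2 limit hlim]
        ring
      · rw [if_pos (by simp [hab])]
        have hacc : (if a ≠ b then (0:Int) + 1 else 0) = 0 + 1 := by simp [hab]
        rw [hacc, loopB_shift _ limit (0 + 1)]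
        by_cases hl : limit = 0
        · subst hl
          rw [swapA, if_pos (by norm_num), show ((0:Int) - (0 + 1)) = -1 by ring,
            loopB_cons, if_pos (by norm_num)]
          ring
        · rw [ih g' a2 b2 (limit - 1) (by omega),
            show (limit - (0 + 1)) = limit - 1 by ring]
          ring

-- ===== VERDICT (by name: the statement is the Claim_ definition above) =====
theorem swap_diff_spec : Claim_equal_swap_diff := by
  intro start goal limit _ hpre
  obtain ⟨hs, hg⟩ := hpre
  unfold Spec_swap_diff swap_diff swap_diff_alt
  by_cases hl : limit < 0
  · rw [swapA_limit_neg _ _ _ hl]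
    obtain ⟨a, s, hs'⟩ : ∃ a s, start.toList = a :: s := by
      cases h : start.toList with
      | nil => exact absurd h hs
      | cons a s => exact ⟨a, s, rfl⟩
    obtain ⟨b, g, hg'⟩ : ∃ b g, goal.toList = b :: g := by
      cases h : goal.toList with
      | nil => exact absurd h hg
      | cons b g => exact ⟨b, g, rfl⟩
    rw [hs', hg']
    simp [loopB, hl]
  · obtain ⟨a, s, hs'⟩ : ∃ a s, start.toList = a :: s := by
      cases h : start.toList with
      | nil => exact absurd h hs
      | cons a s => exact ⟨a, s, rfl⟩
    obtain ⟨b, g, hg'⟩ : ∃ b g, goal.toList = b :: g := by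
      cases h : goal.toList with
      | nil => exact absurd h hg
      | cons b g => exact ⟨b, g, rfl⟩
    rw [hs', hg', swapA_eq_loopB s g a b limit (by omega)]
    simp only [List.zip_cons_cons, List.length_cons]
    congr 1
    push_cast
    ring_nf
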